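-- pv_equiv track=rewrite | github.com/vgdpro/sqlite-cdb-to-json | sqlite_cdb_to_json.py | card_skill
-- ===== SOURCE A (Python) =====
-- def card_skill(skill_number):
--     result = []
--     skill_table = [0x2, 0x4, 0x8, 0x10, 0x20, 0x40]
--
--     for i in range(len(skill_table)):
--         if (skill_number & skill_table[i] > 0): result.append(str(hex(skill_table[i])).removeprefix('0x'))
--
--     if (len(result) == 0):
--          return ['-']
--
--     return result
-- ===== SOURCE B (Python) =====
-- def card_skill(skill_number):
--     result = []
--     masked = skill_number & 0x7E
--     while masked:
--         low = masked & -masked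
--         result.append(format(low, 'x'))
--         masked &= masked - 1
--     return result or ['-']
-- ===== Notes on version B (the rewrite author's own statement) =====
-- stated objective: alternative
-- what changed: B masks skill_number with 0x7E once and extracts set bits in ascending order via low = masked & -masked / masked &= masked - 1, emitting format(low,'x') for each, instead of A's indexed scan over a fixed 6-element table with hex()+removeprefix per hit.
import Mathlib
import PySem

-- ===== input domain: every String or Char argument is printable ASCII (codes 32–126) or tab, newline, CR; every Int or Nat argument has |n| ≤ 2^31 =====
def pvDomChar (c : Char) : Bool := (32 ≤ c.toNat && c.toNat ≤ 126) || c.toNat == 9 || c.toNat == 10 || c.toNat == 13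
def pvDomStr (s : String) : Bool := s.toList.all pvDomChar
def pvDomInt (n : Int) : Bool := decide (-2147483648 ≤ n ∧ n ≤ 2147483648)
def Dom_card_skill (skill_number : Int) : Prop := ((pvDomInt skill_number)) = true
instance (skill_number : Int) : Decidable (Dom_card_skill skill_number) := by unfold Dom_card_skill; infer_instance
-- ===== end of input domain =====

-- B enumerates the set bits of skill_number & 0x7E directly (lowest-set-bit extraction)
-- instead of scanning A's fixed 6-element table; same return value, alternative algorithm.


-- ===== PORT A =====
-- hex(n) for a nonnegative n: "0x" followed by lowercase hex digits (exact for 0 ≤ n;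
-- A only applies it to the positive table constants)
def a_hex (n : Int) : List Char := ['0','x'] ++ Nat.toDigits 16 n.toNat
-- str.removeprefix(pre), on char lists
def a_removeprefix (pre s : List Char) : List Char :=
  if s.take pre.length = pre then s.drop pre.length else s

def card_skill (skill_number : Int) : List String :=
  let skill_table : List Int := [0x2, 0x4, 0x8, 0x10, 0x20, 0x40]
  let result := (PySem.List.pyRange 0 (skill_table.length) 1).foldl (fun result i =>
      if PySem.Int.band skill_number (PySem.List.pyGetD skill_table i 0) > 0 then
        result ++ [String.ofList (a_removeprefix ['0','x'] (a_hex (PySem.List.pyGetD skill_table i 0)))]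
      else result) []
  if result.length = 0 then ["-"] else result

-- ===== PORT B =====
-- format(n, 'x') for a nonnegative n (B only applies it to 0 < low ≤ 0x40)
def b_hex (n : Int) : String := String.ofList (Nat.toDigits 16 n.toNat)

-- `while masked:` — masked = skill_number & 0x7E is always nonnegative, so the loop runs at
-- most masked iterations; the fuel argument only makes that recursion structural.
def b_loop : Nat → Int → List String → List String
  | 0, _, result => result
  | fuel+1, masked, result =>
    if 0 < masked then
      b_loop fuel (PySem.Int.band masked (masked - 1))
        (result ++ [b_hex (PySem.Int.band masked (-masked))])
    else result

def card_skill_alt (skill_number : Int) : List String :=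
  let masked := PySem.Int.band skill_number 0x7E
  let result := b_loop (masked.toNat + 1) masked []
  if result = [] then ["-"] else result

-- ===== PRECONDITION & SPEC =====
def Spec_card_skill (skill_number : Int) (out : List String) : Prop := out = card_skill_alt skill_number
instance (skill_number : Int) (out : List String) : Decidable (Spec_card_skill skill_number out) := by unfold Spec_card_skill; infer_instance

-- ===== CLAIM (what is proved, stated in full; the proofs are below) =====
def Claim_equal_card_skill : Prop := ∀ (skill_number : Int), Dom_card_skill skill_number → Spec_card_skill skill_number (card_skill skill_number)

-- ===== LEMMAS AND PROOFS =====

-- Only the low seven bits of `a` can meet a mask t < 128.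
theorem land_mod (a t : Nat) (ht : t < 128) : a &&& t = (a % 128) &&& t := by
  apply Nat.eq_of_testBit_eq
  intro i
  rw [Nat.testBit_and, Nat.testBit_and]
  rcases lt_or_ge i 7 with h | h
  · have h128 : (128:Nat) = 2^7 := rfl
    rw [h128, Nat.testBit_mod_two_pow]
    simp [h]
  · have hp : (2:Nat)^7 ≤ 2^i := Nat.pow_le_pow_right (by norm_num) h
    have h2 : t < 2^i := lt_of_lt_of_le ht hp
    simp [Nat.testBit_eq_false_of_lt h2]

set_option maxRecDepth 40000 in
theorem neg_case_small : ∀ a t : Fin 128, (t.val - (t.val &&& a.val)) = (127 - a.val) &&& t.val := by decide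

theorem neg_case (m t : Nat) (ht : t < 128) : t - (t &&& m) = (127 - m % 128) &&& t := by
  have h1 : t &&& m = t &&& (m % 128) := by
    rw [Nat.land_comm, land_mod m t ht, Nat.land_comm]
  rw [h1]
  exact neg_case_small ⟨m % 128, Nat.mod_lt _ (by norm_num)⟩ ⟨t, ht⟩

-- `n & t` for a mask t < 128 only depends on n modulo 128 (Python-exact on negatives).
theorem band_reduce (t : Nat) (ht : t < 128) (n : Int) :
    PySem.Int.band n (t : Int) = PySem.Int.band (n % 128) (t : Int) := by
  rcases lt_or_ge n 0 with hn | hn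
  · have hr : 0 ≤ n % 128 := Int.emod_nonneg n (by norm_num)
    rw [PySem.Int.band_of_nonneg hr (by positivity)]
    show PySem.Int.band n _ = _
    unfold PySem.Int.band
    rw [if_neg (by omega), if_pos (by positivity)]
    obtain ⟨m, hm⟩ : ∃ m : Nat, n = -(m : Int) - 1 := ⟨(-n-1).toNat, by omega⟩
    have hm2 : (-n - 1).toNat = m := by omega
    have hmod : (n % 128).toNat = 127 - (m % 128) := by subst hm; omega
    have htn : (t : Int).toNat = t := Int.toNat_natCast t
    rw [htn, hm2, hmod]
    exact congrArg Nat.cast (neg_case m t ht)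
  · rw [PySem.Int.band_of_nonneg hn (by positivity),
        PySem.Int.band_of_nonneg (Int.emod_nonneg n (by norm_num)) (by positivity)]
    have h1 : (n % 128).toNat = n.toNat % 128 := by omega
    rw [h1]
    exact congrArg Nat.cast (land_mod n.toNat t ht)

theorem A_reduce (n : Int) : card_skill n = card_skill (n % 128) := by
  have e2 : PySem.Int.band n 2 = PySem.Int.band (n % 128) 2 := by exact_mod_cast band_reduce 2 (by norm_num) n
  have e4 : PySem.Int.band n 4 = PySem.Int.band (n % 128) 4 := by exact_mod_cast band_reduce 4 (by norm_num) n
  have e8 : PySem.Int.band n 8 = PySem.Int.band (n % 128) 8 := by exact_mod_cast band_reduce 8 (by norm_num) n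
  have e16 : PySem.Int.band n 16 = PySem.Int.band (n % 128) 16 := by exact_mod_cast band_reduce 16 (by norm_num) n
  have e32 : PySem.Int.band n 32 = PySem.Int.band (n % 128) 32 := by exact_mod_cast band_reduce 32 (by norm_num) n
  have e64 : PySem.Int.band n 64 = PySem.Int.band (n % 128) 64 := by exact_mod_cast band_reduce 64 (by norm_num) n
  have hr : PySem.List.pyRange 0 (6:Int) 1 = [0,1,2,3,4,5] := by decide
  simp only [card_skill, List.length_cons, List.length_nil]
  norm_num [hr, List.foldl, PySem.List.pyGetD, PySem.List.pyGet?, PySem.List.pyIdx?,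
    show Int.toNat 2 = 2 from rfl, show Int.toNat 3 = 3 from rfl,
    show Int.toNat 4 = 4 from rfl, show Int.toNat 5 = 5 from rfl,
    List.getElem_cons_zero, List.getElem_cons_succ,
    e2, e4, e8, e16, e32, e64]

theorem B_reduce (n : Int) : card_skill_alt n = card_skill_alt (n % 128) := by
  have e126 : PySem.Int.band n 126 = PySem.Int.band (n % 128) 126 := by
    exact_mod_cast band_reduce 126 (by norm_num) n
  simp only [card_skill_alt]
  rw [show (0x7E : Int) = 126 from rfl, e126]

set_option maxRecDepth 40000 in
theorem all_small : ∀ k : Fin 128, card_skill (k.val : Int) = card_skill_alt (k.val : Int) := by decide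

-- ===== VERDICT (by name: the statement is the Claim_ definition above) =====
theorem card_skill_spec : Claim_equal_card_skill := by
  intro n _
  unfold Spec_card_skill
  rw [A_reduce n, B_reduce n]
  have h0 : 0 ≤ n % 128 := Int.emod_nonneg n (by norm_num)
  have h1 : n % 128 < 128 := Int.emod_lt_of_pos n (by norm_num)
  have hk : ((n % 128).toNat : Int) = n % 128 := Int.toNat_of_nonneg h0
  have := all_small ⟨(n % 128).toNat, by omega⟩
  simpa [hk] using this
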